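-- pv_equiv track=rewrite | github.com/227735/pp1 | 03-ControlStructures/dfds.py | check_people_status
-- ===== SOURCE A (Python) =====
-- def check_people_status(input_str):
--     count = 0
--     for char in input_str:
--         if char == '+':
--             count += 1
--         elif char == '-':
--             count -= 1
--
--         if count < 0:
--             return False
--     return True
-- ===== SOURCE B (Python) =====
-- def check_people_status(input_str):
--     # Bracket-matching view: '+' opens, '-' must close an earlier unmatched '+'.
--     # Maintain a stack of unmatched symbols; valid iff no '-' remains unmatched.
--     stack = []
--     for c in input_str:
--         if c == '-' and stack and stack[-1] == '+':
--             stack.pop()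
--         elif c in '+-':
--             stack.append(c)
--     return '-' not in stack
-- ===== Notes on version B (the rewrite author's own statement) =====
-- stated objective: alternative
-- what changed: Treats the input as a bracket-matching problem: each plus sign pushes onto a stack of unmatched symbols, each minus sign pops a matching plus from the stack top or is itself pushed as unmatched, and the answer is whether no unmatched minus remains at the end, replacing A's running integer counter with early return.
import Mathlib
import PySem

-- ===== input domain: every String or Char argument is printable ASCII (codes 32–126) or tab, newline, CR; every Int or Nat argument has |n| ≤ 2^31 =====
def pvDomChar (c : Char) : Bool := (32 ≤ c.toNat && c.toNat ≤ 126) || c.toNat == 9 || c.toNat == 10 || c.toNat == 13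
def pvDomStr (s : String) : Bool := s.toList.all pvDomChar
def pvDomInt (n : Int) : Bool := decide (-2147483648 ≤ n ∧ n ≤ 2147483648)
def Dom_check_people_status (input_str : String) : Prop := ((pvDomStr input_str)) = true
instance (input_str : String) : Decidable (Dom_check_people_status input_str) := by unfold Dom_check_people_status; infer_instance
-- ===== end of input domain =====

-- B replaces A's running counter with early return by bracket-matching on a stack of
-- unmatched symbols, answering whether an unmatched '-' remains (alternative; no speed claim).

-- ===== PORT A =====
-- A's for-loop with early return: structural recursion carrying the running count.
def cpsGoA : List Char → Int → Bool
  | [], _ => true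
  | c :: cs, count =>
    let count' := if c = '+' then count + 1 else if c = '-' then count - 1 else count
    if count' < 0 then false else cpsGoA cs count'

def check_people_status (input_str : String) : Bool :=
  cpsGoA input_str.toList 0

-- ===== PORT B =====
-- one loop body: '-' pops a matching '+' from the stack top, otherwise '+'/'-' is pushed
def cpsStackStep (stack : List Char) (c : Char) : List Char :=
  if c = '-' ∧ stack ≠ [] ∧ stack.getLast? = some '+' then stack.dropLast
  else if c = '+' ∨ c = '-' then stack ++ [c]
  else stack

def check_people_status_alt (input_str : String) : Bool :=
  let stack := input_str.toList.foldl cpsStackStep []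
  !(stack.contains '-')

-- ===== PRECONDITION & SPEC =====
def Spec_check_people_status (input_str : String) (out : Bool) : Prop := out = check_people_status_alt input_str
instance (input_str : String) (out : Bool) : Decidable (Spec_check_people_status input_str out) := by unfold Spec_check_people_status; infer_instance

-- ===== CLAIM (what is proved, stated in full; the proofs are below) =====
def Claim_equal_check_people_status : Prop := ∀ (input_str : String), Dom_check_people_status input_str → Spec_check_people_status input_str (check_people_status input_str)

-- ===== LEMMAS AND PROOFS =====

-- an unmatched '-' on the stack is never removed
theorem minus_persists (cs : List Char) (stack : List Char) (h : '-' ∈ stack) :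
    '-' ∈ cs.foldl cpsStackStep stack := by
  induction cs generalizing stack with
  | nil => simpa using h
  | cons c cs ih =>
    simp only [List.foldl_cons]
    apply ih
    unfold cpsStackStep
    split_ifs with h1 h2
    · obtain ⟨_, hne, hlast⟩ := h1
      have hdec : stack.dropLast ++ [stack.getLast hne] = stack := List.dropLast_concat_getLast hne
      have : stack.getLast hne = '+' := by
        rw [List.getLast?_eq_some_getLast hne] at hlast
        exact Option.some.inj hlast
      rw [← hdec] at h
      rcases List.mem_append.mp h with h' | h'
      · exact h'
      · simp [this] at h'
    · exact List.mem_append.mpr (Or.inl h)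
    · exact h

-- key invariant: A's loop from count u ≥ 0 agrees with B's fold from a stack of u.toNat pluses
theorem cpsGoA_eq_fold (cs : List Char) (u : Int) (hu : 0 ≤ u) :
    cpsGoA cs u = !((cs.foldl cpsStackStep (List.replicate u.toNat '+')).contains '-') := by
  induction cs generalizing u with
  | nil =>
    simp [cpsGoA, List.contains_eq_mem, List.mem_replicate]
  | cons c cs ih =>
    simp only [cpsGoA, List.foldl_cons]
    by_cases hp : c = '+'
    · have hstep : cpsStackStep (List.replicate u.toNat '+') c
          = List.replicate ((u + 1).toNat) '+' := by
        unfold cpsStackStep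
        have : (u + 1).toNat = u.toNat + 1 := by omega
        simp [hp, this, List.replicate_succ']
      rw [hstep]
      have : ¬ (u + 1 < 0) := by omega
      simp only [hp, if_true, reduceIte, this]
      simpa using ih (u + 1) (by omega)
    · by_cases hm : c = '-'
      · by_cases hz : u = 0
        · subst hz
          have hstep : cpsStackStep (List.replicate (0:Int).toNat '+') c = ['-'] := by
            unfold cpsStackStep; simp [hm]
          rw [hstep]
          have : '-' ∈ cs.foldl cpsStackStep ['-'] :=
            minus_persists cs ['-'] (by simp)
          simp [hm, List.contains_eq_mem, this]
        · have hu1 : 1 ≤ u := by omega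
          have hn : u.toNat = (u - 1).toNat + 1 := by omega
          have hstep : cpsStackStep (List.replicate u.toNat '+') c
              = List.replicate ((u - 1).toNat) '+' := by
            unfold cpsStackStep
            rw [hn, List.replicate_succ']
            simp [hm]
          rw [hstep]
          have h1 : ¬ (u < 1) := by omega
          simpa [hm, h1] using ih (u - 1) (by omega)
      · have hstep : cpsStackStep (List.replicate u.toNat '+') c
            = List.replicate u.toNat '+' := by
          unfold cpsStackStep; simp [hp, hm]
        rw [hstep]
        have : ¬ (u < 0) := by omega
        simp only [if_neg hp, if_neg hm, this, if_false]
        simpa using ih u hu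

-- ===== VERDICT (by name: the statement is the Claim_ definition above) =====
theorem check_people_status_spec : Claim_equal_check_people_status := by
  intro s _
  unfold Spec_check_people_status check_people_status check_people_status_alt
  simpa using cpsGoA_eq_fold s.toList 0 (by omega)
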